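-- pv_equiv track=rewrite | github.com/Juunsik/Algorithm_Kata | Lv11/279.py | solution
-- ===== SOURCE A (Python) =====
-- def solution(a, b, n):
--     answer = 0
--     while n >= a:
--         buy = (n // a) * a
--         reward = (n // a) * b
--         n = n - buy + reward
--         answer += reward
--     return answer
-- ===== SOURCE B (Python) =====
-- def solution(a, b, n):
--     # Closed form: each single exchange turns a bottles into b (net loss a-b),
--     # and the total reward is b times the number of single exchanges possible.
--     if n < a:
--         return 0
--     return b * ((n - a) // (a - b) + 1)
-- ===== Notes on version B (the rewrite author's own statement) =====
-- stated objective: simpler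
-- what changed: Replaced A's while-loop of batched bottle exchanges with a direct closed-form formula: the answer is b times the number of single exchanges, b * ((n - a) // (a - b) + 1) when n >= a, else 0.
-- outside the precondition, e.g. on solution(3, -5, 7): A returns -10, B returns -5; on solution(-2, 1, 3): A returns -2, B returns -1; on solution(0, 1, 5): A raises ZeroDivisionError, B returns -4
import Mathlib
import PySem

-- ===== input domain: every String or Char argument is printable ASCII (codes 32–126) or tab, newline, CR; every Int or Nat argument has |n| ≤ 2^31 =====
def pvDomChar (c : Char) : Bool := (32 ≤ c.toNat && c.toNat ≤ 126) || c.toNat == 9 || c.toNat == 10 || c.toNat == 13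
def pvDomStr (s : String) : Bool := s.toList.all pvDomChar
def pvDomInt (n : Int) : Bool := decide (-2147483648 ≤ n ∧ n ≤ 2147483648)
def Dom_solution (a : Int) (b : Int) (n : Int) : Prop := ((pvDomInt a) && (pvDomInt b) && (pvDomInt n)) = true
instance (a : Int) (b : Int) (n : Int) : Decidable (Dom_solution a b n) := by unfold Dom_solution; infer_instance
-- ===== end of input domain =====

-- B replaces A's bottle-exchange loop with a closed-form count of the exchanges (objective: simpler).

-- ===== PORT A =====
-- A's while-loop, as fuel recursion; on Pre_ inputs n drops by ≥ 1 per iteration, so fuel n.toNat + 1 suffices.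
def solutionLoop (a b : Int) : Nat → Int → Int → Int
  | 0, _, answer => answer
  | fuel + 1, n, answer =>
    if a ≤ n then
      let buy := PySem.Int.floordiv n a * a
      let reward := PySem.Int.floordiv n a * b
      solutionLoop a b fuel (n - buy + reward) (answer + reward)
    else answer

def solution (a : Int) (b : Int) (n : Int) : Int :=
  solutionLoop a b (n.toNat + 1) n 0

-- ===== PORT B =====
def solution_alt (a : Int) (b : Int) (n : Int) : Int :=
  if n < a then 0 else b * (PySem.Int.floordiv (n - a) (a - b) + 1)

-- ===== PRECONDITION & SPEC =====
-- Pre_ restricts to the natural bottle-exchange domain: either no exchange happens (n < a),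
-- or group size a ≥ 1 with reward 0 ≤ b < a; for a ≤ 0 or b outside [0, a) with n ≥ a,
-- A raises (a = 0), diverges, or returns accidental batched-floor-division values on a
-- non-sensical input that a per-exchange reading cannot match.
def Pre_solution (a : Int) (b : Int) (n : Int) : Prop :=
  n < a ∨ (1 ≤ a ∧ 0 ≤ b ∧ b < a)
instance (a : Int) (b : Int) (n : Int) : Decidable (Pre_solution a b n) := by
  unfold Pre_solution; infer_instance

def pvWitness_solution : Int × Int × Int := (3, 1, 10)

def Spec_solution (a : Int) (b : Int) (n : Int) (out : Int) : Prop := out = solution_alt a b n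
instance (a : Int) (b : Int) (n : Int) (out : Int) : Decidable (Spec_solution a b n out) := by unfold Spec_solution; infer_instance

-- ===== CLAIM (what is proved, stated in full; the proofs are below) =====
def Claim_equal_solution : Prop := ∀ (a : Int) (b : Int) (n : Int), Dom_solution a b n → Pre_solution a b n → Spec_solution a b n (solution a b n)

-- ===== LEMMAS AND PROOFS =====

-- Closed form for the count: on n ≥ a the answer adds b * ((n - a) / (a - b) + 1).
theorem solutionLoop_closed (a b : Int) (ha : 1 ≤ a) (hb0 : 0 ≤ b) (hba : b < a) :
    ∀ (fuel : Nat) (n answer : Int), n < a + fuel →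
      solutionLoop a b fuel n answer =
        answer + (if a ≤ n then b * ((n - a) / (a - b) + 1) else 0) := by
  intro fuel
  induction fuel with
  | zero =>
    intro n answer hfu
    simp only [solutionLoop]
    have : ¬ a ≤ n := by omega
    simp [this]
  | succ fuel ih =>
    intro n answer hfu
    simp only [solutionLoop]
    by_cases hn : a ≤ n
    · simp only [hn, if_true]
      have hapos : (0:Int) < a := by omega
      have hfd : PySem.Int.floordiv n a = n / a :=
        PySem.Int.floordiv_eq_ediv_of_pos hapos
      set q := n / a with hq
      have hq1 : 1 ≤ q := by
        rw [hq, Int.le_ediv_iff_mul_le hapos]; omega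
      set d := a - b with hd
      have hdpos : (0:Int) < d := by omega
      set n' := n - q * a + q * b with hn'
      have hnn' : n = n' + q * d := by rw [hn', hd]; ring
      -- r = n % a bounds give n' ≥ q * b ≥ b ≥ 0
      have hr0 : 0 ≤ n % a := Int.emod_nonneg n (by omega)
      have hra : n % a < a := Int.emod_lt_of_pos n hapos
      have hmod : n % a = n - q * a := by
        rw [hq]; rw [Int.emod_def]; ring
      have hn'lb : q * b ≤ n' := by
        have : n' = (n - q * a) + q * b := by rw [hn']
        omega
      have hbqb : b ≤ q * b := by nlinarith
      have hdec : n' + 1 ≤ n := by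
        have : d ≤ q * d := by nlinarith
        omega
      have hstep : (n - a) / d = (n' - a) / d + q := by
        have : n - a = (n' - a) + q * d := by omega
        rw [this, Int.add_mul_ediv_right _ _ (by omega : d ≠ 0)]
      rw [hfd, ih (n - q * a + q * b) (answer + q * b) (by omega)]
      by_cases hcn : a ≤ n - q * a + q * b
      · rw [if_pos hcn, hstep]
        have hne : n' = n - q * a + q * b := hn'
        rw [← hne]
        ring
      · rw [if_neg hcn]
        -- here n' < a and n' ≥ b, so (n' - a) / d = -1
        have hlt : n' < a := by rw [hn']; omega
        have hge : b ≤ n' := by omega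
        have h1 : n' - a = (n' - a + d) + (-1) * d := by ring
        have h2 : (n' - a + d) / d = 0 :=
          Int.ediv_eq_zero_of_lt (by omega) (by omega)
        have h3 : (n' - a) / d = -1 := by
          rw [h1, Int.add_mul_ediv_right _ _ (by omega : d ≠ 0), h2]
          ring
        rw [hstep, h3]
        ring
    · simp [hn]

-- ===== VERDICT (by name: the statement is the Claim_ definition above) =====
theorem solution_spec : Claim_equal_solution := by
  intro a b n _hdom hpre
  unfold Spec_solution solution solution_alt
  rcases hpre with hlt | ⟨ha, hb0, hba⟩
  · -- n < a: the loop exits immediately and B returns 0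
    simp only [solutionLoop, if_neg (by omega : ¬ a ≤ n), if_pos hlt]
  · rw [solutionLoop_closed a b ha hb0 hba (n.toNat + 1) n 0 (by omega)]
    by_cases hn : n < a
    · simp [hn, show ¬ a ≤ n by omega]
    · have hfd : PySem.Int.floordiv (n - a) (a - b) = (n - a) / (a - b) :=
        PySem.Int.floordiv_eq_ediv_of_pos (by omega)
      simp [hn, show a ≤ n by omega, hfd]
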